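-- pv_equiv track=rewrite | github.com/Gaoray001/ZYNQ7020_AD9361 | Py/patch_tcl_version_guard.py | count_braces_for_tcl
-- ===== SOURCE A (Python) =====
-- def count_braces_for_tcl(line: str) -> int:
--     """
--     对一行 Tcl 做一个简化的花括号计数：
--     - 先去掉行首注释符 '#'
--     - 忽略简单的字符串状态
--     这里不追求 Tcl 完整语法，只服务于版本检查块定位。
--     """
--     s = line.lstrip()
--     if s.startswith("#"):
--         s = s[1:].lstrip()
--
--     brace_delta = 0
--     in_string = False
--     escape = False
--
--     for ch in s:
--         if escape:
--             escape = False
--             continue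
--
--         if ch == "\\":
--             escape = True
--             continue
--
--         if ch == '"':
--             in_string = not in_string
--             continue
--
--         if in_string:
--             continue
--
--         if ch == "{":
--             brace_delta += 1
--         elif ch == "}":
--             brace_delta -= 1
--
--     return brace_delta
-- ===== SOURCE B (Python) =====
-- import re
--
-- def count_braces_for_tcl(line: str) -> int:
--     s = line.lstrip()
--     if s.startswith("#"):
--         s = s[1:].lstrip()
--     s = re.sub(r'\\.', '', s, flags=re.DOTALL)   # drop escaped pairs (lone trailing backslash stays)
--     s = re.sub(r'"[^"]*"?', '', s)               # drop quoted regions; unterminated quote swallows the rest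
--     return s.count('{') - s.count('}')
-- ===== Notes on version B (the rewrite author's own statement) =====
-- stated objective: simpler
-- what changed: Replaces the stateful character-by-character loop (escape/in-string flags, running delta) by two regex substitutions that delete escaped pairs and quoted regions, followed by plain str.count of each brace.
import Mathlib
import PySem

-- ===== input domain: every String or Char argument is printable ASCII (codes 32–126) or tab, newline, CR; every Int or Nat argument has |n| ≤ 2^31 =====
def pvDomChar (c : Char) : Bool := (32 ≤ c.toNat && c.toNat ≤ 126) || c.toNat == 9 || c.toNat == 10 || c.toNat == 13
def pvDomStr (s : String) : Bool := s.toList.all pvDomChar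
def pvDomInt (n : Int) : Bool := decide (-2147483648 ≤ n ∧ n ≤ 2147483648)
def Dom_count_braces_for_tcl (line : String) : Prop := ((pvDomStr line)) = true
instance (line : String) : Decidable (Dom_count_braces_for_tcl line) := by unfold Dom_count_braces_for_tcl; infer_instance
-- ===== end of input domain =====

-- B replaces A's stateful escape/in-string character loop by deleting escaped pairs and
-- quoted regions up front and then plainly counting braces (objective: simpler).


-- shared comment-stripping preamble (identical in both Pythons):
-- s = line.lstrip(); if s.startswith('#'): s = s[1:].lstrip()
def pvPre (line : String) : List Char :=
  let s := PySem.Chars.lstrip line.toList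
  if PySem.Chars.startswith s ['#'] then PySem.Chars.lstrip (PySem.Chars.slice s (some 1) none)
  else s

-- ===== PORT A =====
-- the for-loop over s with state (brace_delta, in_string, escape)
def pvLoopA : List Char → Int → Bool → Bool → Int
  | [], d, _, _ => d
  | c :: r, d, instr, esc =>
    if esc then pvLoopA r d instr false
    else if c = '\\' then pvLoopA r d instr true
    else if c = '"' then pvLoopA r d (!instr) esc
    else if instr then pvLoopA r d instr esc
    else if c = '{' then pvLoopA r (d + 1) instr esc
    else if c = '}' then pvLoopA r (d - 1) instr esc
    else pvLoopA r d instr esc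

def count_braces_for_tcl (line : String) : Int :=
  pvLoopA (pvPre line) 0 false false

-- ===== PORT B =====
-- hand port of re.sub(r'\\.', '', s, flags=re.DOTALL): exact for this pattern — each
-- backslash deletes itself and the following character; a lone trailing backslash stays
def pvStripEsc : List Char → List Char
  | [] => []
  | '\\' :: _ :: r => pvStripEsc r
  | c :: r => c :: pvStripEsc r

def pvDropQ : List Char → List Char
  | [] => []
  | '"' :: r => r
  | _ :: r => pvDropQ r

theorem pvDropQ_cons_ne {c : Char} {r : List Char} (h : c ≠ '"') :
    pvDropQ (c :: r) = pvDropQ r := by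
  conv_lhs => rw [pvDropQ.eq_def]
  split <;> simp_all

theorem pvDropQ_length_le (r : List Char) : (pvDropQ r).length ≤ r.length := by
  induction r with
  | nil => simp [pvDropQ]
  | cons c r ih =>
    by_cases h : c = '"'
    · subst h; simp [pvDropQ]
    · rw [pvDropQ_cons_ne h]; exact Nat.le_trans ih (Nat.le_succ _)

-- hand port of re.sub(r'"[^"]*"?', '', s): exact for this pattern — each quote deletes
-- through the next quote (or the rest of the line if unterminated)
def pvStripQ : List Char → List Char
  | [] => []
  | '"' :: r => pvStripQ (pvDropQ r)
  | c :: r => c :: pvStripQ r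
termination_by t => t.length
decreasing_by
  · exact Nat.lt_succ_of_le (pvDropQ_length_le r)
  · simp

def count_braces_for_tcl_alt (line : String) : Int :=
  let s := pvStripQ (pvStripEsc (pvPre line))
  (s.count '{' : Int) - (s.count '}' : Int)

-- ===== PRECONDITION & SPEC =====
def Spec_count_braces_for_tcl (line : String) (out : Int) : Prop := out = count_braces_for_tcl_alt line
instance (line : String) (out : Int) : Decidable (Spec_count_braces_for_tcl line out) := by unfold Spec_count_braces_for_tcl; infer_instance

-- ===== CLAIM (what is proved, stated in full; the proofs are below) =====
def Claim_equal_count_braces_for_tcl : Prop := ∀ (line : String), Dom_count_braces_for_tcl line → Spec_count_braces_for_tcl line (count_braces_for_tcl line)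

-- ===== LEMMAS AND PROOFS =====

-- A's loop after escape removal: the simple quote-toggling automaton
def pvG : List Char → Bool → Int
  | [], _ => 0
  | '"' :: r, instr => pvG r (!instr)
  | _ :: r, true => pvG r true
  | '{' :: r, false => pvG r false + 1
  | '}' :: r, false => pvG r false - 1
  | _ :: r, false => pvG r false

theorem pvG_cons (c : Char) (r : List Char) (instr : Bool) :
    pvG (c :: r) instr =
      if c = '"' then pvG r (!instr)
      else if instr then pvG r true
      else if c = '{' then pvG r false + 1
      else if c = '}' then pvG r false - 1
      else pvG r false := by
  conv_lhs => rw [pvG.eq_def]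
  split <;> simp_all

theorem pvStripEsc_cons_ne {c : Char} {r : List Char} (h : c ≠ '\\') :
    pvStripEsc (c :: r) = c :: pvStripEsc r := by
  conv_lhs => rw [pvStripEsc.eq_def]
  split <;> simp_all

theorem pvLoopA_cons (c : Char) (r : List Char) (d : Int) (instr esc : Bool) :
    pvLoopA (c :: r) d instr esc =
      if esc then pvLoopA r d instr false
      else if c = '\\' then pvLoopA r d instr true
      else if c = '"' then pvLoopA r d (!instr) esc
      else if instr then pvLoopA r d instr esc
      else if c = '{' then pvLoopA r (d + 1) instr esc
      else if c = '}' then pvLoopA r (d - 1) instr esc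
      else pvLoopA r d instr esc := rfl

theorem pvLoopA_eq_pvG : ∀ (s : List Char) (d : Int) (instr : Bool),
    pvLoopA s d instr false = d + pvG (pvStripEsc s) instr := by
  intro s
  induction s using pvStripEsc.induct with
  | case1 => intro d instr; simp [pvLoopA, pvStripEsc, pvG]
  | case2 x r ih =>
    intro d instr
    rw [pvLoopA_cons, if_neg (by simp), if_pos rfl, pvLoopA_cons, if_pos rfl]
    rw [show pvStripEsc ('\\' :: x :: r) = pvStripEsc r from rfl]
    exact ih d instr
  | case3 c r hne ih =>
    intro d instr
    by_cases hc : c = '\\'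
    · subst hc
      cases r with
      | nil =>
        rw [pvLoopA_cons, if_neg (by simp), if_pos rfl]
        show d = d + pvG (pvStripEsc ['\\']) instr
        have : pvG (pvStripEsc ['\\']) instr = 0 := by cases instr <;> rfl
        omega
      | cons a b => exact (hne a b rfl rfl).elim
    · rw [pvLoopA_cons, if_neg (by simp), if_neg hc, pvStripEsc_cons_ne hc, pvG_cons]
      cases instr <;> split_ifs <;> (try simp only [Bool.not_true, Bool.not_false]) <;> rw [ih] <;> first | omega | simp_all

theorem pvG_true_eq (r : List Char) : pvG r true = pvG (pvDropQ r) false := by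
  induction r with
  | nil => rfl
  | cons c r ih =>
    by_cases hq : c = '"'
    · subst hq; rw [pvG_cons, if_pos rfl]; rfl
    · rw [pvG_cons, if_neg hq, if_pos rfl, pvDropQ_cons_ne hq, ih]

theorem pvStripQ_cons_ne {c : Char} {r : List Char} (h : c ≠ '"') :
    pvStripQ (c :: r) = c :: pvStripQ r := by
  conv_lhs => rw [pvStripQ.eq_def]
  split <;> simp_all

theorem pvG_false_eq : ∀ (t : List Char),
    pvG t false = ((pvStripQ t).count '{' : Int) - ((pvStripQ t).count '}' : Int) := by
  intro t
  induction t using pvStripQ.induct with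
  | case1 => simp [pvG, pvStripQ]
  | case2 r ih =>
    rw [pvG_cons, if_pos rfl]
    rw [show pvStripQ ('"' :: r) = pvStripQ (pvDropQ r) from by rw [pvStripQ.eq_def]; rfl]
    rw [show pvG r (!false) = pvG r true from rfl, pvG_true_eq, ih]
  | case3 c r hne ih =>
    have hq : c ≠ '"' := fun h => hne h
    rw [pvG_cons, if_neg hq, pvStripQ_cons_ne hq]
    simp only [List.count_cons, if_neg (Bool.false_ne_true)]
    split_ifs with h1 h2 <;> simp_all <;> omega

-- ===== VERDICT (by name: the statement is the Claim_ definition above) =====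
theorem count_braces_for_tcl_spec : Claim_equal_count_braces_for_tcl := by
  intro line _
  unfold Spec_count_braces_for_tcl count_braces_for_tcl count_braces_for_tcl_alt
  simp [pvLoopA_eq_pvG, pvG_false_eq]
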